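-- pv_equiv track=rewrite | github.com/leej1230/quixo | helper_func.py | access_check
-- ===== SOURCE A (Python) =====
-- def access_check(board):
--     P1list_to_return = []
--     P2list_to_return = []
--     size = len(board[0])
--     for x in range(size):
--         for y in range(size):
--             if x in [0, size-1] or y in [0,size-1]:
--                 if board[x][y] == 0:
--                     P1list_to_return.append([x,y])
--                     P2list_to_return.append([x,y])
--                 elif board[x][y] == 1:
--                     P1list_to_return.append([x,y])
--                 else:
--                     P2list_to_return.append([x,y])
--     return P1list_to_return, P2list_to_return
-- ===== SOURCE B (Python) =====
-- def access_check(board):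
--     size = len(board[0])
--     # enumerate the border coordinates directly, in row-major order:
--     # top row, then the two side cells of each middle row, then the bottom row
--     cells = [(0, y) for y in range(size)]
--     for x in range(1, size - 1):
--         cells.append((x, 0))
--         cells.append((x, size - 1))
--     if size > 1:
--         cells.extend((size - 1, y) for y in range(size))
--     P1, P2 = [], []
--     for x, y in cells:
--         v = board[x][y]
--         if v != 1:
--             P2.append([x, y])
--         if v == 0 or v == 1:
--             P1.append([x, y])
--     return P1, P2
-- ===== Notes on version B (the rewrite author's own statement) =====
-- stated objective: faster
-- what changed: A scans all size*size cells and tests each for being on the border; B enumerates the ~4*size border coordinates directly (top row, side cells of middle rows, bottom row) and classifies only those, dropping the quadratic scan.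
import Mathlib
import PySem

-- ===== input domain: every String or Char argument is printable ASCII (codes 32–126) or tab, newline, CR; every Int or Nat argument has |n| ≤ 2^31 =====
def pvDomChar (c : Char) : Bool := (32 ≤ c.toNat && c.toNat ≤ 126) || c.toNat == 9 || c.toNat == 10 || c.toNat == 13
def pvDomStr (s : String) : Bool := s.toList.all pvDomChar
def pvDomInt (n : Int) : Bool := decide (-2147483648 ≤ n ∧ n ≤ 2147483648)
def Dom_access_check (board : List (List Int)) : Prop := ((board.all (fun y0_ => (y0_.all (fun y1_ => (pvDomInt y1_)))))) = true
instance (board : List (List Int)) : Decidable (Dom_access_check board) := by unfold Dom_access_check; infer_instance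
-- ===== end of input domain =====

-- B enumerates the O(n) border coordinates directly instead of A's O(n^2) scan of
-- the whole grid with a border test; equal return value on all of Pre_.

-- cell access board[x][y]; defaults never reached under Pre_ (A would raise there)
def pvCell (board : List (List Int)) (x y : Int) : Int :=
  (PySem.List.pyGet? ((PySem.List.pyGet? board x).getD []) y).getD 0

-- ===== PORT A =====
def access_check (board : List (List Int)) : List (List Int) × List (List Int) :=
  let size : Int := ((board.headD []).length : Int)
  (PySem.List.pyRange 0 size 1).foldl (fun acc x =>
    (PySem.List.pyRange 0 size 1).foldl (fun acc y =>
      if x = 0 ∨ x = size - 1 ∨ y = 0 ∨ y = size - 1 then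
        if pvCell board x y = 0 then
          (acc.1 ++ [[x, y]], acc.2 ++ [[x, y]])
        else if pvCell board x y = 1 then
          (acc.1 ++ [[x, y]], acc.2)
        else
          (acc.1, acc.2 ++ [[x, y]])
      else acc) acc) ([], [])

-- ===== PORT B =====
def access_check_alt (board : List (List Int)) : List (List Int) × List (List Int) :=
  let size : Int := ((board.headD []).length : Int)
  let cells0 : List (Int × Int) := (PySem.List.pyRange 0 size 1).map (fun y => ((0 : Int), y))
  let cells1 : List (Int × Int) :=
    (PySem.List.pyRange 1 (size - 1) 1).foldl (fun c x => c ++ [(x, (0 : Int)), (x, size - 1)]) cells0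
  let cells : List (Int × Int) :=
    if size > 1 then cells1 ++ (PySem.List.pyRange 0 size 1).map (fun y => (size - 1, y)) else cells1
  cells.foldl (fun acc p =>
    let v := pvCell board p.1 p.2
    let acc := if v ≠ 1 then (acc.1, acc.2 ++ [[p.1, p.2]]) else acc
    if v = 0 ∨ v = 1 then (acc.1 ++ [[p.1, p.2]], acc.2) else acc) ([], [])

-- ===== PRECONDITION & SPEC =====
-- Pre_ excludes exactly the inputs where Python A raises IndexError: the empty board
-- (board[0]) and boards whose indexed rows/columns are shorter than len(board[0]).
def Pre_access_check (board : List (List Int)) : Prop :=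
  board ≠ [] ∧ (board.headD []).length ≤ board.length ∧
    ∀ r ∈ board.take (board.headD []).length, (board.headD []).length ≤ r.length
instance (board : List (List Int)) : Decidable (Pre_access_check board) := by
  unfold Pre_access_check; infer_instance
def pvWitness_access_check : List (List Int) := [[0, 2], [1, 0]]

def Spec_access_check (board : List (List Int)) (out : List (List Int) × List (List Int)) : Prop := out = access_check_alt board
instance (board : List (List Int)) (out : List (List Int) × List (List Int)) : Decidable (Spec_access_check board out) := by unfold Spec_access_check; infer_instance

-- ===== CLAIM (what is proved, stated in full; the proofs are below) =====
def Claim_equal_access_check : Prop := ∀ (board : List (List Int)), Dom_access_check board → Pre_access_check board → Spec_access_check board (access_check board)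

-- ===== LEMMAS AND PROOFS =====

-- the per-cell step both programs perform, as one function over a coordinate pair
def pvStep (board : List (List Int)) (acc : List (List Int) × List (List Int))
    (p : Int × Int) : List (List Int) × List (List Int) :=
  if pvCell board p.1 p.2 = 0 then (acc.1 ++ [[p.1, p.2]], acc.2 ++ [[p.1, p.2]])
  else if pvCell board p.1 p.2 = 1 then (acc.1 ++ [[p.1, p.2]], acc.2)
  else (acc.1, acc.2 ++ [[p.1, p.2]])

-- B's step body equals pvStep (case analysis on the cell value)
theorem pv_step_eq (board : List (List Int)) (acc : List (List Int) × List (List Int))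
    (p : Int × Int) :
    (let v := pvCell board p.1 p.2
     let acc := if v ≠ 1 then (acc.1, acc.2 ++ [[p.1, p.2]]) else acc
     if v = 0 ∨ v = 1 then (acc.1 ++ [[p.1, p.2]], acc.2) else acc)
    = pvStep board acc p := by
  unfold pvStep
  by_cases h0 : pvCell board p.1 p.2 = 0
  · simp [h0]
  · by_cases h1 : pvCell board p.1 p.2 = 1 <;> simp [h0, h1]

-- foldl with an if-guard over a list = foldl over the filtered list
theorem pv_foldl_filter {α β : Type} (p : α → Prop) [DecidablePred p]
    (f : β → α → β) (l : List α) (init : β) :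
    l.foldl (fun acc a => if p a then f acc a else acc) init
      = (l.filter (fun a => decide (p a))).foldl f init := by
  induction l generalizing init with
  | nil => rfl
  | cons a l ih =>
    by_cases h : p a <;> simp [h, ih]

-- foldl over a flatMap = nested foldl
theorem pv_foldl_flatMap {α β γ : Type} (f : α → List β) (g : γ → β → γ)
    (l : List α) (init : γ) :
    (l.flatMap f).foldl g init = l.foldl (fun acc a => (f a).foldl g acc) init := by
  induction l generalizing init with
  | nil => rfl
  | cons a l ih => simp [List.flatMap_cons, List.foldl_append, ih]

-- fold that appends two fixed cells per element = list ++ flatMap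
theorem pv_foldl_append2 {α : Type} (f g : α → Int × Int) (l : List α)
    (init : List (Int × Int)) :
    l.foldl (fun c x => c ++ [f x, g x]) init
      = init ++ l.flatMap (fun x => [f x, g x]) := by
  induction l generalizing init with
  | nil => simp
  | cons a l ih => simp [ih]

-- the row-major border coordinates, as A's scan produces them
def pvBorder (size : Int) : List (Int × Int) :=
  (PySem.List.pyRange 0 size 1).flatMap (fun x =>
    ((PySem.List.pyRange 0 size 1).filter (fun y =>
      decide (x = 0 ∨ x = size - 1 ∨ y = 0 ∨ y = size - 1))).map (fun y => (x, y)))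

-- splitting the scan range into row 0, the middle rows, and row size-1
theorem pv_split (size : Int) (hs : size > 1) :
    PySem.List.pyRange 0 size 1
      = [0] ++ (PySem.List.pyRange 1 (size - 1) 1 ++ [size - 1]) := by
  rw [PySem.List.pyRange_one_append 0 1 size (by omega) (by omega),
      PySem.List.pyRange_one_append 1 (size - 1) size (by omega) (by omega),
      show PySem.List.pyRange 0 1 1 = [(0 : Int)] from by decide,
      show PySem.List.pyRange (size - 1) size 1 = [size - 1] from by
        have := PySem.List.pyRange_one_singleton (size - 1)
        rwa [show size - 1 + 1 = size from by omega] at this]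

-- for a middle row, the filter keeps exactly the two side cells
theorem pv_mid_flatMap (size : Int) :
    (PySem.List.pyRange 1 (size - 1) 1).flatMap (fun x =>
      (([0] ++ (PySem.List.pyRange 1 (size - 1) 1 ++ [size - 1])).filter (fun y =>
        decide (x = 0 ∨ x = size - 1 ∨ y = 0 ∨ y = size - 1))).map (fun y => (x, y)))
    = (PySem.List.pyRange 1 (size - 1) 1).flatMap (fun x => [(x, (0 : Int)), (x, size - 1)]) := by
  apply List.flatMap_congr
  intro x hx
  have hxb := (PySem.List.mem_pyRange_one).mp hx
  have hx0 : ¬ (x = 0) := by omega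
  have hxs : ¬ (x = size - 1) := by omega
  have hmid : (PySem.List.pyRange 1 (size - 1) 1).filter (fun y =>
      decide (x = 0 ∨ x = size - 1 ∨ y = 0 ∨ y = size - 1)) = [] := by
    apply List.filter_eq_nil_iff.mpr
    intro y hy
    have := (PySem.List.mem_pyRange_one).mp hy
    simp only [decide_eq_true_eq]
    omega
  simp [List.filter_append, hx0, hxs]
  omega

-- B's explicitly assembled coordinate list equals the row-major border list
theorem pv_cells_eq (size : Int) :
    (let cells0 : List (Int × Int) := (PySem.List.pyRange 0 size 1).map (fun y => ((0 : Int), y))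
     let cells1 : List (Int × Int) :=
       (PySem.List.pyRange 1 (size - 1) 1).foldl (fun c x => c ++ [(x, (0 : Int)), (x, size - 1)]) cells0
     if size > 1 then cells1 ++ (PySem.List.pyRange 0 size 1).map (fun y => (size - 1, y)) else cells1)
    = pvBorder size := by
  simp only [pv_foldl_append2]
  unfold pvBorder
  by_cases hs : size > 1
  · -- size ≥ 2: split the outer range, evaluate the filter on each of the three parts
    have e0 : (([0] ++ (PySem.List.pyRange 1 (size - 1) 1 ++ [size - 1])).filter (fun y =>
        decide ((0 : Int) = 0 ∨ (0 : Int) = size - 1 ∨ y = 0 ∨ y = size - 1)))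
        = [0] ++ (PySem.List.pyRange 1 (size - 1) 1 ++ [size - 1]) :=
      List.filter_eq_self.mpr (fun y _ => by simp)
    have e1 : (([0] ++ (PySem.List.pyRange 1 (size - 1) 1 ++ [size - 1])).filter (fun y =>
        decide (size - 1 = 0 ∨ size - 1 = size - 1 ∨ y = 0 ∨ y = size - 1)))
        = [0] ++ (PySem.List.pyRange 1 (size - 1) 1 ++ [size - 1]) :=
      List.filter_eq_self.mpr (fun y _ => by simp)
    conv_rhs => rw [pv_split size hs]
    rw [List.flatMap_append, List.flatMap_append, List.flatMap_singleton, List.flatMap_singleton,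
        pv_mid_flatMap size, e0, e1, ← pv_split size hs, if_pos hs, List.append_assoc]
  · -- size ≤ 1: no middle rows, no separate bottom row
    have hmid : PySem.List.pyRange 1 (size - 1) 1 = [] :=
      PySem.List.pyRange_one_eq_nil (by omega)
    simp only [hmid, List.flatMap_nil, List.append_nil, if_neg hs]
    by_cases h1 : size = 1
    · subst h1; decide
    · have : PySem.List.pyRange 0 size 1 = [] := PySem.List.pyRange_one_eq_nil (by omega)
      simp [this]

-- ===== VERDICT (by name: the statement is the Claim_ definition above) =====
theorem access_check_spec : Claim_equal_access_check := by
  intro board _ _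
  show access_check board = access_check_alt board
  unfold access_check access_check_alt
  simp only
  rw [pv_cells_eq ((board.headD []).length : Int)]
  -- B's fold over the border list, with its step rewritten to pvStep
  rw [show (fun (acc : List (List Int) × List (List Int)) (p : Int × Int) =>
        let v := pvCell board p.1 p.2
        let acc := if v ≠ 1 then (acc.1, acc.2 ++ [[p.1, p.2]]) else acc
        if v = 0 ∨ v = 1 then (acc.1 ++ [[p.1, p.2]], acc.2) else acc)
      = pvStep board from funext fun acc => funext fun p => pv_step_eq board acc p]
  -- A's guarded double scan = fold of pvStep over the border list
  unfold pvBorder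
  rw [pv_foldl_flatMap]
  congr 1
  funext acc x
  rw [pv_foldl_filter (fun y => x = 0 ∨ x = ((board.headD []).length : Int) - 1 ∨ y = 0 ∨ y = ((board.headD []).length : Int) - 1)
      (fun acc y =>
        if pvCell board x y = 0 then (acc.1 ++ [[x, y]], acc.2 ++ [[x, y]])
        else if pvCell board x y = 1 then (acc.1 ++ [[x, y]], acc.2)
        else (acc.1, acc.2 ++ [[x, y]]))]
  rw [List.foldl_map]
  simp [pvStep]
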